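-- pv_equiv track=rewrite | github.com/isakshay007/Leetcode_Solutions | Leetcode/Replace_Elements_By_Rank_Array.py | rank_elements
-- ===== SOURCE A (Python) =====
-- from collections import defaultdict
--
-- def rank_elements(arr):
--     n  = len(arr)
--     brr = sorted(arr)
--     rank_map = defaultdict(int)
--
--     rank=1
--     for i in brr:
--         if i not in rank_map:
--             rank_map[i]=rank
--             rank+=1
--
--     result=[]
--     for i in arr:
--         result.append(rank_map[i])
--     return result
-- ===== SOURCE B (Python) =====
-- def rank_elements(arr):
--     s = set(arr)
--     return [1 + sum(1 for v in s if v < x) for x in arr]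
-- ===== Notes on version B (the rewrite author's own statement) =====
-- stated objective: simpler
-- what changed: B drops the sort and the value-to-rank dict entirely: the rank of x is computed directly as 1 plus the number of distinct values strictly below x, via a set and a counting comprehension.
import Mathlib
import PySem

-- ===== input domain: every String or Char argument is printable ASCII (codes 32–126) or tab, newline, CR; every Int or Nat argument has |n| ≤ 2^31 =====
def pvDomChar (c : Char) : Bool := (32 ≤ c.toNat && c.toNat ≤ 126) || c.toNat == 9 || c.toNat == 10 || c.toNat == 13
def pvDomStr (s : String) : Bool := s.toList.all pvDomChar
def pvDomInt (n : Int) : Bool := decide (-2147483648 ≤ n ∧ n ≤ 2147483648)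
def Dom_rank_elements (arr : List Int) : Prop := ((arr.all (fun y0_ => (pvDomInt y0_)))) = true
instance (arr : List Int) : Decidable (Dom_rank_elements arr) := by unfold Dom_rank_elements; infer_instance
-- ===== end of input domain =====

-- B replaces the sort + value→rank dict by direct counting of distinct smaller values (simpler, not faster).

-- ===== PORT A =====
def rank_elements (arr : List Int) : List Int :=
  let _n := arr.length
  let brr := PySem.List.sorted arr (fun x => x) false
  let st := brr.foldl
    (fun (st : PySem.Dict Int Int × Int) i =>
      if st.1.contains i then st else (st.1.insert i st.2, st.2 + 1))
    (PySem.Dict.empty, 1)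
  arr.foldl (fun result i => result ++ [st.1.getD i 0]) []

-- ===== PORT B =====
def rank_elements_alt (arr : List Int) : List Int :=
  let s := PySem.Set.ofList arr
  arr.map (fun x => 1 + s.foldl (fun acc v => if v < x then acc + 1 else acc) (0 : Int))

-- ===== PRECONDITION & SPEC =====
def Spec_rank_elements (arr : List Int) (out : List Int) : Prop := out = rank_elements_alt arr
instance (arr : List Int) (out : List Int) : Decidable (Spec_rank_elements arr out) := by unfold Spec_rank_elements; infer_instance

-- ===== CLAIM (what is proved, stated in full; the proofs are below) =====
def Claim_equal_rank_elements : Prop := ∀ (arr : List Int), Dom_rank_elements arr → Spec_rank_elements arr (rank_elements arr)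

-- ===== LEMMAS AND PROOFS =====

-- the keys A's dict-building loop will newly insert, given the keys `ks` already present
def pvNewKeys : List Int → List Int → List Int
  | [], _ => []
  | i :: l, ks => if i ∈ ks then pvNewKeys l ks else i :: pvNewKeys l (i :: ks)

-- lookup of the rank a key receives when the keys of `ks` get ranks r, r+1, …
def pvLookR (r : Int) : List Int → Int → Int
  | [], _ => 0
  | k :: ksl, x => if x = k then r else pvLookR (r + 1) ksl x

theorem pvNewKeys_mem : ∀ (l ks : List Int) (x : Int), x ∈ pvNewKeys l ks ↔ x ∈ l ∧ x ∉ ks := by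
  intro l
  induction l with
  | nil => intro ks x; simp [pvNewKeys]
  | cons i l ih =>
    intro ks x
    by_cases hi : i ∈ ks
    · simp only [pvNewKeys, if_pos hi, ih, List.mem_cons]
      constructor
      · rintro ⟨hx, hks⟩; exact ⟨Or.inr hx, hks⟩
      · rintro ⟨hx | hx, hks⟩
        · exact absurd (hx ▸ hi) hks
        · exact ⟨hx, hks⟩
    · simp only [pvNewKeys, if_neg hi, List.mem_cons, ih]
      constructor
      · rintro (rfl | ⟨hx, hks⟩)
        · exact ⟨Or.inl rfl, hi⟩
        · exact ⟨Or.inr hx, fun h => hks (Or.inr h)⟩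
      · rintro ⟨rfl | hx, hks⟩
        · exact Or.inl rfl
        · by_cases hxi : x = i
          · exact Or.inl hxi
          · exact Or.inr ⟨hx, by simp [hxi, hks]⟩

theorem pvNewKeys_nodup : ∀ (l ks : List Int), (pvNewKeys l ks).Nodup := by
  intro l
  induction l with
  | nil => intro ks; simp [pvNewKeys]
  | cons i l ih =>
    intro ks
    by_cases hi : i ∈ ks
    · simpa [pvNewKeys, hi] using ih ks
    · simp only [pvNewKeys, if_neg hi, List.nodup_cons]
      refine ⟨fun h => ?_, ih _⟩
      exact ((pvNewKeys_mem _ _ _).1 h).2 (List.mem_cons_self)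

theorem pvNewKeys_sublist : ∀ (l ks : List Int), (pvNewKeys l ks).Sublist l := by
  intro l
  induction l with
  | nil => intro ks; simp [pvNewKeys]
  | cons i l ih =>
    intro ks
    by_cases hi : i ∈ ks
    · simpa [pvNewKeys, hi] using (ih ks).trans (List.sublist_cons_self i l)
    · simpa [pvNewKeys, hi] using List.Sublist.cons₂ i (ih (i :: ks))

theorem pvLookR_eq : ∀ (ks : List Int), ks.Pairwise (· < ·) → ∀ (x : Int), x ∈ ks → ∀ (r : Int),
    pvLookR r ks x = r + (ks.countP (fun v => decide (v < x)) : Int) := by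
  intro ks
  induction ks with
  | nil => intro _ x hx; cases hx
  | cons k ksl ih =>
    intro hp x hx r
    rcases List.pairwise_cons.1 hp with ⟨hk, hp'⟩
    by_cases hxk : x = k
    · subst hxk
      have h0 : ksl.countP (fun v => decide (v < x)) = 0 := by
        apply List.countP_eq_zero.2
        intro v hv
        simp [not_lt.2 (le_of_lt (hk v hv))]
      simp [pvLookR, h0]
    · have hmem : x ∈ ksl := by
        rcases List.mem_cons.1 hx with h | h
        · exact absurd h hxk
        · exact h
      have hkx : k < x := hk x hmem
      rw [pvLookR, if_neg hxk, ih hp' x hmem (r + 1), List.countP_cons]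
      simp [hkx]
      ring

-- characterisation of A's dict-building fold: lookup after the loop
theorem pvFold_getD : ∀ (l : List Int) (d : PySem.Dict Int Int) (r : Int) (ks : List Int),
    (∀ k, d.contains k = decide (k ∈ ks)) → ∀ (x : Int),
    ((l.foldl
        (fun (st : PySem.Dict Int Int × Int) i =>
          if st.1.contains i then st else (st.1.insert i st.2, st.2 + 1))
        (d, r)).1).getD x 0
      = if x ∈ ks then d.getD x 0 else pvLookR r (pvNewKeys l ks) x := by
  intro l
  induction l with
  | nil =>
    intro d r ks h x
    simp only [List.foldl_nil, pvNewKeys, pvLookR]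
    by_cases hx : x ∈ ks
    · simp [hx]
    · have : d.contains x = false := by rw [h x]; simp [hx]
      simp [hx, PySem.Dict.getD_of_not_contains d 0 this]
  | cons i l ih =>
    intro d r ks h x
    rw [List.foldl_cons]
    by_cases hi : i ∈ ks
    · have hc : d.contains i = true := by rw [h i]; simp [hi]
      simp only [hc, if_true]
      rw [ih d r ks h x]
      simp [pvNewKeys, hi]
    · have hc : d.contains i = false := by rw [h i]; simp [hi]
      simp only [hc, Bool.false_eq_true, if_false]
      have h' : ∀ k, (d.insert i r).contains k = decide (k ∈ i :: ks) := by
        intro k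
        rw [PySem.Dict.contains_insert, h k]
        by_cases hk : k = i <;> simp [hk, List.mem_cons]
      rw [ih (d.insert i r) (r + 1) (i :: ks) h' x]
      simp only [pvNewKeys, if_neg hi, List.mem_cons]
      by_cases hx : x ∈ ks
      · have hxi : x ≠ i := fun e => hi (e ▸ hx)
        simp [hx, hxi, PySem.Dict.getD_insert_of_ne d r 0 hxi]
      · by_cases hxi : x = i
        · subst hxi
          simp [hx, PySem.Dict.getD_insert_self, pvLookR]
        · simp [hx, hxi, pvLookR]

theorem pv_rank_value (arr : List Int) (i : Int) (hi : i ∈ arr) :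
    ((((PySem.List.sorted arr (fun x => x) false).foldl
        (fun (st : PySem.Dict Int Int × Int) j =>
          if st.1.contains j then st else (st.1.insert j st.2, st.2 + 1))
        (PySem.Dict.empty, 1)).1).getD i 0)
      = 1 + ((PySem.Set.ofList arr).countP (fun v => decide (v < i)) : Int) := by
  set brr := PySem.List.sorted arr (fun x => x) false with hbrr
  have hmemb : ∀ x, x ∈ brr ↔ x ∈ arr := fun x => PySem.List.mem_sorted arr (fun x => x) false x
  have h0 : ∀ k, (PySem.Dict.empty : PySem.Dict Int Int).contains k = decide (k ∈ ([] : List Int)) := by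
    intro k; simp [PySem.Dict.contains_empty]
  rw [pvFold_getD brr PySem.Dict.empty 1 [] h0 i]
  simp only [List.not_mem_nil, if_false]
  have hnk_nodup := pvNewKeys_nodup brr []
  have hnk_mem : ∀ x, x ∈ pvNewKeys brr [] ↔ x ∈ arr := by
    intro x
    rw [pvNewKeys_mem]
    simp [hmemb]
  have hple : brr.Pairwise (· ≤ ·) := by
    have := PySem.List.sorted_pairwise arr (fun x => x)
    simpa [hbrr] using this
  have hplt : (pvNewKeys brr []).Pairwise (· < ·) := by
    have h1 : (pvNewKeys brr []).Pairwise (· ≤ ·) :=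
      List.Pairwise.sublist (pvNewKeys_sublist brr []) hple
    have h2 : (pvNewKeys brr []).Pairwise (· ≠ ·) := hnk_nodup
    exact (h1.and h2).imp (fun h => lt_of_le_of_ne h.1 h.2)
  have hmem : i ∈ pvNewKeys brr [] := (hnk_mem i).2 hi
  rw [pvLookR_eq _ hplt i hmem 1]
  have hperm : (pvNewKeys brr []).Perm (PySem.Set.ofList arr) := by
    rw [List.perm_ext_iff_of_nodup hnk_nodup (PySem.Set.nodup_ofList arr)]
    intro a
    rw [hnk_mem a, PySem.Set.mem_ofList]
  rw [List.Perm.countP_eq _ hperm]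

-- ===== VERDICT (by name: the statement is the Claim_ definition above) =====
theorem rank_elements_spec : Claim_equal_rank_elements := by
  intro arr _
  unfold Spec_rank_elements rank_elements rank_elements_alt
  rw [PySem.List.foldl_append_singleton_eq_map]
  simp only [List.nil_append]
  apply List.map_congr_left
  intro i hi
  rw [pv_rank_value arr i hi, PySem.List.foldl_ite_add_one (fun v => v < i)]
  simp
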